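-- pv_equiv track=rewrite | github.com/Radical-Ghost/Python | Academic/TE/CN/Bit Stuffing.py | unstuffing
-- ===== SOURCE A (Python) =====
-- def unstuffing(bit_sequence):
--     unstuffed_sequence = []
--     consecutive_ones = 0
--
--     i = 0
--     while i < len(bit_sequence):
--         unstuffed_sequence.append(bit_sequence[i])
--         if bit_sequence[i] == 1:
--             consecutive_ones += 1
--             if consecutive_ones == 5 and i + 1 < len(bit_sequence) and bit_sequence[i + 1] == 0:
--                 i += 1  # Skip the stuffed 0
--                 consecutive_ones = 0
--         else:
--             consecutive_ones = 0
--         i += 1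
--
--     return unstuffed_sequence
-- ===== SOURCE B (Python) =====
-- def unstuffing(bit_sequence):
--     # Run-length decomposition: encode the sequence into (value, count) runs,
--     # then rebuild, dropping one zero from a zero-run that follows a ones-run
--     # of length exactly 5.
--     runs = []
--     for b in bit_sequence:
--         if runs and runs[-1][0] == b:
--             runs[-1] = (b, runs[-1][1] + 1)
--         else:
--             runs.append((b, 1))
--     out = []
--     after_five_ones = False
--     for val, cnt in runs:
--         if after_five_ones and val == 0:
--             cnt -= 1
--         after_five_ones = (val == 1 and cnt == 5)
--         out.extend([val] * cnt)
--     return out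
-- ===== Notes on version B (the rewrite author's own statement) =====
-- stated objective: alternative
-- what changed: Replaces A's single interleaved index loop (append each bit, count consecutive ones, advance past a stuffed zero in place) by a run-length-encoding decomposition: first encode the sequence into (value,count) runs, then rebuild the output run by run, dropping one zero from any zero-run that immediately follows a ones-run of length exactly five.
import Mathlib
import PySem

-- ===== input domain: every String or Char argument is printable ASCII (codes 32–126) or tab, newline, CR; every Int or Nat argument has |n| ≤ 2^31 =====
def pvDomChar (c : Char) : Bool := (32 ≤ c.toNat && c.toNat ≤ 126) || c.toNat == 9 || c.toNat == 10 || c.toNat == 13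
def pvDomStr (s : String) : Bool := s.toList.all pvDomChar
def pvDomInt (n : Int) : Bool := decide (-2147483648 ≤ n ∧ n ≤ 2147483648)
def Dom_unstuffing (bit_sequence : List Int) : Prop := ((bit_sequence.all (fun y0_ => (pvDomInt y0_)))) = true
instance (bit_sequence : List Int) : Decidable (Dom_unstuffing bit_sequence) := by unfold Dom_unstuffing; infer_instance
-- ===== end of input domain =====

-- B replaces A's interleaved index loop by a run-length-encoding decomposition
-- (encode into (value,count) runs, rebuild dropping one zero after a ones-run of 5);
-- objective: alternative, not faster.

-- ===== PORT A =====
-- A's while loop: index i, consecutive-ones counter, output accumulator.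
def unstuffingGo (bs : List Int) (i cnt : Int) (acc : List Int) : List Int :=
  if h : i < (bs.length : Int) then
    let b := PySem.List.pyGetD bs i 0
    let acc' := acc ++ [b]
    if b = 1 then
      let c := cnt + 1
      if c = 5 ∧ i + 1 < (bs.length : Int) ∧ PySem.List.pyGetD bs (i + 1) 0 = 0 then
        unstuffingGo bs (i + 2) 0 acc'
      else
        unstuffingGo bs (i + 1) c acc'
    else
      unstuffingGo bs (i + 1) 0 acc'
  else acc
termination_by ((bs.length : Int) - i).toNat
decreasing_by all_goals omega

def unstuffing (bit_sequence : List Int) : List Int :=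
  unstuffingGo bit_sequence 0 0 []

-- ===== PORT B =====
-- B's first pass: run-length encode (Python's runs[-1] update / append step).
def runStep (acc : List (Int × Int)) (b : Int) : List (Int × Int) :=
  match acc.getLast? with
  | some (v, c) => if v = b then acc.dropLast ++ [(b, c + 1)] else acc ++ [(b, 1)]
  | none => acc ++ [(b, 1)]

-- B's second pass: rebuild run by run, dropping one zero after a ones-run of 5.
def outStep (st : Bool × List Int) (run : Int × Int) : Bool × List Int :=
  let c := if st.1 ∧ run.1 = 0 then run.2 - 1 else run.2
  (decide (run.1 = 1 ∧ c = 5), st.2 ++ List.replicate c.toNat run.1)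

def unstuffing_alt (bit_sequence : List Int) : List Int :=
  let runs := bit_sequence.foldl runStep []
  (runs.foldl outStep (false, [])).2

-- ===== PRECONDITION & SPEC =====
def Spec_unstuffing (bit_sequence : List Int) (out : List Int) : Prop := out = unstuffing_alt bit_sequence
instance (bit_sequence : List Int) (out : List Int) : Decidable (Spec_unstuffing bit_sequence out) := by unfold Spec_unstuffing; infer_instance

-- ===== CLAIM (what is proved, stated in full; the proofs are below) =====
def Claim_equal_unstuffing : Prop := ∀ (bit_sequence : List Int), Dom_unstuffing bit_sequence → Spec_unstuffing bit_sequence (unstuffing bit_sequence)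

-- ===== LEMMAS AND PROOFS =====

-- Proof-only restatement of A's loop as a structural recursion on the list.
def goL : List Int → Int → List Int
  | [], _ => []
  | b :: t, cnt =>
    if b = 1 then
      if cnt + 1 = 5 ∧ t.head? = some 0 then b :: goL t.tail 0
      else b :: goL t (cnt + 1)
    else b :: goL t 0
termination_by l _ => l.length
decreasing_by all_goals (simp [List.length_tail]; try omega)

-- Proof-only recursive form of B's second pass.
def procRuns : Bool → List (Int × Int) → List Int
  | _, [] => []
  | flag, (v, c) :: rs =>
    let c' := if flag ∧ v = 0 then c - 1 else c
    List.replicate c'.toNat v ++ procRuns (decide (v = 1 ∧ c' = 5)) rs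

theorem foldl_outStep (rs : List (Int × Int)) : ∀ (flag : Bool) (out : List Int),
    (rs.foldl outStep (flag, out)).2 = out ++ procRuns flag rs := by
  induction rs with
  | nil => intro flag out; simp [procRuns]
  | cons r t ih =>
    intro flag out
    obtain ⟨v, c⟩ := r
    simp only [List.foldl_cons, outStep, procRuns, ih]
    split_ifs <;> simp_all

theorem foldl_runStep_prefix (l : List Int) : ∀ (P acc : List (Int × Int)), acc ≠ [] →
    l.foldl runStep (P ++ acc) = P ++ l.foldl runStep acc := by
  induction l with
  | nil => intro P acc _; simp
  | cons b t ih =>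
    intro P acc hacc
    have hlast : (P ++ acc).getLast? = acc.getLast? := List.getLast?_append_of_ne_nil P hacc
    have hdrop : (P ++ acc).dropLast = P ++ acc.dropLast := List.dropLast_append_of_ne_nil hacc
    simp only [List.foldl_cons, runStep, hlast]
    cases hl : acc.getLast? with
    | none => simp at hl; exact absurd hl hacc
    | some vc =>
      obtain ⟨v, c⟩ := vc
      by_cases hvb : v = b
      · simp only [hvb, hdrop, List.append_assoc]
        exact ih P (acc.dropLast ++ [(b, c + 1)]) (by simp)
      · simp only [if_neg hvb, List.append_assoc]
        exact ih P (acc ++ [(b, 1)]) (by simp)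

theorem foldl_runStep_absorb (j : Nat) : ∀ (v c : Int) (rest : List Int),
    (List.replicate j v ++ rest).foldl runStep [(v, c)] = rest.foldl runStep [(v, c + j)] := by
  induction j with
  | zero => intro v c rest; simp
  | succ k ih =>
    intro v c rest
    have : runStep [(v, c)] v = [(v, c + 1)] := by simp [runStep]
    simp only [List.replicate_succ, List.cons_append, List.foldl_cons, this]
    rw [ih]
    have : c + 1 + (k : Int) = c + ((k : Int) + 1) := by ring
    simp [this]

theorem runsFold_char (k : Nat) (b : Int) (rest : List Int) (h : rest.head? ≠ some b) :
    (List.replicate (k + 1) b ++ rest).foldl runStep [] =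
      (b, (k : Int) + 1) :: rest.foldl runStep [] := by
  have h1 : runStep [] b = [(b, 1)] := by simp [runStep]
  rw [List.replicate_succ, List.cons_append, List.foldl_cons, h1, foldl_runStep_absorb]
  cases rest with
  | nil => simp [Int.add_comm]
  | cons w r =>
    have hwb : ¬ b = w := by intro he; apply h; simp [he]
    have h2 : runStep [(b, 1 + (k : Int))] w = [(b, 1 + (k : Int))] ++ [(w, 1)] := by
      simp [runStep, hwb]
    rw [List.foldl_cons, h2, foldl_runStep_prefix r [(b, 1 + (k : Int))] [(w, 1)] (by simp)]
    have h3 : runStep [] w = [(w, 1)] := by simp [runStep]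
    have hc : 1 + (k : Int) = (k : Int) + 1 := by ring
    simp [List.foldl_cons, h3, hc]

theorem goL_run_ne_one (v : Int) (hv : v ≠ 1) (k : Nat) :
    ∀ (rest : List Int), goL (List.replicate k v ++ rest) 0 = List.replicate k v ++ goL rest 0 := by
  induction k with
  | zero => intro rest; simp
  | succ j ih =>
    intro rest
    rw [List.replicate_succ, List.cons_append, goL, if_neg hv, ih]
    simp

theorem goL_run_one (k : Nat) : ∀ (c : Int) (rest : List Int),
    goL (List.replicate (k + 1) 1 ++ rest) c =
      List.replicate (k + 1) 1 ++
        (if c + ((k : Int) + 1) = 5 ∧ rest.head? = some 0 then goL rest.tail 0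
         else goL rest (c + ((k : Int) + 1))) := by
  induction k with
  | zero =>
    intro c rest
    simp only [List.replicate_one, List.singleton_append, Nat.cast_zero, zero_add]
    rw [goL]
    split_ifs <;> simp_all
  | succ j ih =>
    intro c rest
    have hhead : (List.replicate (j + 1) 1 ++ rest).head? = some 1 := by
      simp [List.replicate_succ]
    rw [List.replicate_succ, List.cons_append, goL, if_pos rfl]
    have hcond : ¬ (c + 1 = 5 ∧ (List.replicate (j + 1) 1 ++ rest).head? = some (0 : Int)) := by
      rw [hhead]; rintro ⟨-, h⟩; simp at h
    rw [if_neg hcond, ih (c + 1) rest]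
    have harith : c + 1 + ((j : Int) + 1) = c + ((j : Int) + 1 + 1) := by ring
    simp only [harith]
    push_cast
    simp [List.replicate_succ]

theorem procRuns_flag_irrel (v c : Int) (hv : v ≠ 0) (rs : List (Int × Int)) :
    procRuns true ((v, c) :: rs) = procRuns false ((v, c) :: rs) := by
  simp [procRuns, hv]

-- head?-of-dropWhile is not the dropped value
theorem head?_dropWhile_ne (b : Int) (t : List Int) :
    (t.dropWhile (fun x => x == b)).head? ≠ some b := by
  induction t with
  | nil => simp
  | cons w r ih =>
    by_cases hw : w = b
    · simpa [List.dropWhile_cons, hw] using ih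
    · simp [hw]

theorem takeWhile_eq_replicate (b : Int) (t : List Int) :
    t.takeWhile (fun x => x == b) = List.replicate (t.takeWhile (fun x => x == b)).length b := by
  apply List.eq_replicate_of_mem
  intro x hx
  have := List.mem_takeWhile_imp hx
  simpa using this

theorem goL_eq_procRuns (n : Nat) : ∀ (l : List Int), l.length ≤ n →
    goL l 0 = procRuns false (l.foldl runStep []) := by
  induction n with
  | zero =>
    intro l hl
    have : l = [] := List.eq_nil_of_length_eq_zero (by omega)
    subst this; simp [goL, procRuns]
  | succ m ih =>
    intro l hl
    cases l with
    | nil => simp [goL, procRuns]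
    | cons b t =>
      set k0 := (t.takeWhile (fun x => x == b)).length with hk0
      set rest := t.dropWhile (fun x => x == b) with hrest
      have hsplit : t = List.replicate k0 b ++ rest := by
        conv_lhs => rw [← List.takeWhile_append_dropWhile (p := fun x => x == b) (l := t)]
        rw [hk0, hrest, ← takeWhile_eq_replicate b t]
      have hlform : b :: t = List.replicate (k0 + 1) b ++ rest := by
        rw [List.replicate_succ, List.cons_append, ← hsplit]
      have hhead : rest.head? ≠ some b := head?_dropWhile_ne b t
      have hrlen : rest.length ≤ t.length := by
        rw [hrest]; exact (List.dropWhile_sublist _).length_le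
      have hrm : rest.length ≤ m := by simp at hl; omega
      have hruns : (List.replicate (k0 + 1) b ++ rest).foldl runStep [] = (b, (k0 : Int) + 1) :: rest.foldl runStep [] :=
        runsFold_char k0 b rest hhead
      by_cases hb1 : b = 1
      · -- ones run
        subst hb1
        rw [hlform, goL_run_one k0 0 rest, hruns]

        have hzadd : (0 : Int) + ((k0 : Int) + 1) = (k0 : Int) + 1 := by ring
        rw [hzadd]
        by_cases hcond : ((k0 : Int) + 1 = 5 ∧ rest.head? = some 0)
        · -- stuffed zero: rest = 0 :: r
          obtain ⟨hk5, hr0⟩ := hcond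
          rw [if_pos ⟨hk5, hr0⟩]
          cases hr : rest with
          | nil => rw [hr] at hr0; simp at hr0
          | cons w r =>
            have hw0 : w = 0 := by rw [hr] at hr0; simpa using hr0
            subst hw0
            -- decompose r into its zero run
            set m0 := (r.takeWhile (fun x => x == (0:Int))).length with hm0
            set r' := r.dropWhile (fun x => x == (0:Int)) with hr'
            have hrsplit : r = List.replicate m0 0 ++ r' := by
              conv_lhs => rw [← List.takeWhile_append_dropWhile (p := fun x => x == (0:Int)) (l := r)]
              rw [hm0, hr', ← takeWhile_eq_replicate 0 r]
            have hrhead : r'.head? ≠ some 0 := head?_dropWhile_ne 0 r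
            have hr'm : r'.length ≤ m := by
              have h1 : r'.length ≤ r.length := by
                rw [hr']; exact (List.dropWhile_sublist _).length_le
              rw [hr] at hrlen; simp at hrlen hl; omega
            have hrestruns : rest.foldl runStep [] = (0, (m0 : Int) + 1) :: r'.foldl runStep [] := by
              rw [hr]
              have : (0:Int) :: r = List.replicate (m0 + 1) 0 ++ r' := by
                rw [List.replicate_succ, List.cons_append, ← hrsplit]
              rw [this]; exact runsFold_char m0 0 r' hrhead
            -- LHS tail
            have htail : rest.tail = List.replicate m0 0 ++ r' := by rw [hr]; simpa using hrsplit
            rw [← hr, htail, goL_run_ne_one 0 (by norm_num) m0 r', ih r' hr'm]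
            -- RHS
            rw [hrestruns]
            have h5 : ((k0 : Int) + 1) = 5 := hk5
            simp only [procRuns, h5]
            norm_num
            all_goals omega
        · rw [if_neg hcond]
          have hto : (((k0 : Int)) + 1).toNat = k0 + 1 := by omega
          cases hr : rest with
          | nil => simp [goL, procRuns, hto]
          | cons w r =>
            have hw1 : w ≠ 1 := fun he => hhead (by simp [hr, he])
            have hg : goL (w :: r) ((k0 : Int) + 1) = goL (w :: r) 0 := by
              rw [goL, goL, if_neg hw1, if_neg hw1]
            have hlen : (w :: r).length ≤ m := by rw [← hr]; exact hrm
            rw [hg, ih (w :: r) hlen]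
            by_cases hk5 : ((k0 : Int)) + 1 = 5
            · have hw0 : w ≠ 0 := fun he => hcond ⟨hk5, by simp [hr, he]⟩
              have hr2 : r = List.replicate (r.takeWhile (fun x => x == w)).length w ++ r.dropWhile (fun x => x == w) := by
                conv_lhs => rw [← List.takeWhile_append_dropWhile (p := fun x => x == w) (l := r)]
                rw [← takeWhile_eq_replicate w r]
              have hcons : w :: r = List.replicate ((r.takeWhile (fun x => x == w)).length + 1) w ++ r.dropWhile (fun x => x == w) := by
                rw [List.replicate_succ, List.cons_append, ← hr2]
              have hrw : (w :: r).foldl runStep [] = (w, ((r.takeWhile (fun x => x == w)).length : Int) + 1) :: (r.dropWhile (fun x => x == w)).foldl runStep [] := by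
                rw [hcons]; exact runsFold_char _ w _ (head?_dropWhile_ne w r)
              have hirr := procRuns_flag_irrel w (((r.takeWhile (fun x => x == w)).length : Int) + 1) hw0 ((r.dropWhile (fun x => x == w)).foldl runStep [])
              rw [hrw]
              have hk04 : k0 = 4 := by omega
              simp [procRuns, hw0, hk04, List.replicate]
            · simp [procRuns, hk5, hto]
      · -- non-one run
        rw [hlform, goL_run_ne_one b hb1 (k0 + 1) rest, ih rest hrm, hruns]
        simp only [procRuns]
        simp [hb1]

-- A-side bridge: the index loop equals the structural recursion on the dropped list.
theorem unstuffingGo_eq_goL : ∀ (m : Nat) (bs : List Int) (i cnt : Int) (acc : List Int),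
    0 ≤ i → ((bs.length : Int) - i).toNat ≤ m →
    unstuffingGo bs i cnt acc = acc ++ goL (bs.drop i.toNat) cnt := by
  intro m
  induction m with
  | zero =>
    intro bs i cnt acc hi hm
    have h : ¬ i < (bs.length : Int) := by omega
    have hdrop : bs.drop i.toNat = [] := List.drop_eq_nil_of_le (by omega)
    rw [unstuffingGo, hdrop]
    simp [h, goL]
  | succ m ih =>
    intro bs i cnt acc hi hm
    by_cases h : i < (bs.length : Int)
    · have hjlt : i.toNat < bs.length := by omega
      have hb : PySem.List.pyGetD bs i 0 = bs[i.toNat] :=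
        PySem.List.pyGetD_eq_getElem _ _ hi h
      have hdrop : bs.drop i.toNat = bs[i.toNat] :: bs.drop (i.toNat + 1) :=
        List.drop_eq_getElem_cons hjlt
      have hhead : (bs.drop (i.toNat + 1)).head? = bs[i.toNat + 1]? := List.head?_drop
      rw [unstuffingGo, hdrop, goL]
      simp only [h, dif_pos, hb]
      have hcondeq : (cnt + 1 = 5 ∧ i + 1 < (bs.length : Int) ∧ PySem.List.pyGetD bs (i + 1) 0 = 0)
          ↔ (cnt + 1 = 5 ∧ (bs.drop (i.toNat + 1)).head? = some 0) := by
        constructor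
        · rintro ⟨h5, hlt, hz⟩
          refine ⟨h5, ?_⟩
          have hj1 : i.toNat + 1 < bs.length := by omega
          have : PySem.List.pyGetD bs (i + 1) 0 = bs[i.toNat + 1] := by
            have := PySem.List.pyGetD_eq_getElem (i := i + 1) bs 0 (by omega) (by omega)
            simpa [show (i + 1).toNat = i.toNat + 1 by omega] using this
          rw [hhead, List.getElem?_eq_getElem hj1]
          rw [this] at hz; simp [hz]
        · rintro ⟨h5, hz⟩
          rw [hhead] at hz
          have hj1 : i.toNat + 1 < bs.length := by
            by_contra hc
            rw [List.getElem?_eq_none (by omega)] at hz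
            simp at hz
          rw [List.getElem?_eq_getElem hj1] at hz
          have hval : bs[i.toNat + 1] = 0 := by simpa using hz
          refine ⟨h5, by omega, ?_⟩
          have := PySem.List.pyGetD_eq_getElem (i := i + 1) bs 0 (by omega) (by omega)
          simpa [show (i + 1).toNat = i.toNat + 1 by omega, hval] using this
      by_cases hb1 : bs[i.toNat] = (1 : Int)
      · simp only [hb1]
        by_cases hc : cnt + 1 = 5 ∧ i + 1 < (bs.length : Int) ∧ PySem.List.pyGetD bs (i + 1) 0 = 0
        · rw [if_pos hc, if_pos (hcondeq.mp hc)]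
          have htail : (bs.drop (i.toNat + 1)).tail = bs.drop (i.toNat + 2) := by
            rw [List.tail_drop]
          rw [ih bs (i + 2) 0 (acc ++ [(1:Int)]) (by omega) (by omega), htail]
          have : (i + 2).toNat = i.toNat + 2 := by omega
          simp [this]
        · rw [if_neg hc, if_neg (fun hx => hc (hcondeq.mpr hx))]
          rw [ih bs (i + 1) (cnt + 1) (acc ++ [(1:Int)]) (by omega) (by omega)]
          have : (i + 1).toNat = i.toNat + 1 := by omega
          simp [this]
      · simp only [if_neg hb1]
        rw [ih bs (i + 1) 0 (acc ++ [bs[i.toNat]]) (by omega) (by omega)]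
        have : (i + 1).toNat = i.toNat + 1 := by omega
        simp [this]
    · have hdrop : bs.drop i.toNat = [] := List.drop_eq_nil_of_le (by omega)
      rw [unstuffingGo, hdrop]
      simp [h, goL]

-- ===== VERDICT (by name: the statement is the Claim_ definition above) =====
theorem unstuffing_spec : Claim_equal_unstuffing := by
  unfold Claim_equal_unstuffing
  intro bs _
  unfold Spec_unstuffing unstuffing unstuffing_alt
  rw [unstuffingGo_eq_goL bs.length bs 0 0 [] le_rfl (by omega)]
  simp only [List.nil_append, Int.toNat_zero, List.drop_zero]
  rw [goL_eq_procRuns bs.length bs le_rfl, foldl_outStep]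
  simp
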